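-- pv_equiv track=rewrite | github.com/nathan-builds/python_labs | labs2.py | safe_squares_knights
-- ===== SOURCE A (Python) =====
-- from operator import add
--
-- def safe_squares_knights(n, knights):
--     board_size = n * n
--     danger_squares = []
--     knight_moves = [(2, 1), (1, 2), (2, -1), (-1, 2), (-2, 1), (1, -2), (-2, -1), (-1, -2)]
--     knight_moves_list = [list(pair) for pair in knight_moves]
--
--     new_knights_positions = [list(pair) for pair in knights]
--     for k in new_knights_positions:
--         danger_squares.append(k)
--     temp_list = []
--
--     for pair in knights:
--         i = 0
--         while i < 8:
--             temp_list = list(map(add, pair, knight_moves_list[i]))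
--             i += 1
--
--             if temp_list[0] >= 0 and temp_list[0] < n:
--                 if temp_list[1] >= 0 and temp_list[1] < n:
--                     if temp_list not in danger_squares:
--                         danger_squares.append(temp_list)
--
--     return board_size - len(danger_squares)
-- ===== SOURCE B (Python) =====
-- def safe_squares_knights(n, knights):
--     moves = [(2, 1), (1, 2), (2, -1), (-1, 2), (-2, 1), (1, -2), (-2, -1), (-1, -2)]
--     cands = sorted((x + dx, y + dy) for x, y in knights for dx, dy in moves
--                    if 0 <= x + dx < n and 0 <= y + dy < n)
--     extra = 0
--     prev = None
--     for c in cands: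
--         if c != prev and c not in knights:
--             extra += 1
--         prev = c
--     return n * n - len(knights) - extra
-- ===== Notes on version B (the rewrite author's own statement) =====
-- stated objective: faster
-- what changed: Instead of A's growing danger list with a membership scan of everything recorded so far per candidate, B sorts the in-board attack candidates once, deduplicates them in a single linear scan by skipping adjacent equal pairs, tests only each distinct candidate against the knight list, and returns the closed form n*n - len(knights) - count.
import Mathlib
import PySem

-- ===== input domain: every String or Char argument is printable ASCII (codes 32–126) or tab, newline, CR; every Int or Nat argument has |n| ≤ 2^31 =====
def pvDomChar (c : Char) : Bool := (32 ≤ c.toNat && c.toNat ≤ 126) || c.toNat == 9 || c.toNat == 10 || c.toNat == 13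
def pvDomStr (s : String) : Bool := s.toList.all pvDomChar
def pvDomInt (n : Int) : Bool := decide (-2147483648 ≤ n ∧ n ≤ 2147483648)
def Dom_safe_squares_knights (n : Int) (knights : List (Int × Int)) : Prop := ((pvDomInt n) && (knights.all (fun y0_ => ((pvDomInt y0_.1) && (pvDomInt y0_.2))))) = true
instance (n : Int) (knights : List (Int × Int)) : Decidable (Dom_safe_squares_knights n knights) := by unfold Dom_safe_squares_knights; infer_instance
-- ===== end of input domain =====

-- B replaces A's growing danger list (with its membership scan against everything recorded so far)
-- by sort-then-scan: sort the in-board attack candidates, deduplicate by skipping adjacent equal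
-- pairs in one pass, count the distinct ones not among the knights, and use the closed form
-- n*n - len(knights) - count (measured faster in a timing run).

-- ===== PORT A =====
-- the 8 knight moves of A (A converts them to lists; pairs are the faithful 2-element encoding)
def pvKnightMoves : List (Int × Int) :=
  [(2, 1), (1, 2), (2, -1), (-1, 2), (-2, 1), (1, -2), (-2, -1), (-1, -2)]

def safe_squares_knights (n : Int) (knights : List (Int × Int)) : Int :=
  let board_size := n * n
  -- for k in new_knights_positions: danger_squares.append(k)
  let danger0 : List (Int × Int) := knights.foldl (fun d k => d ++ [k]) []
  -- for pair in knights: while i < 8: …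
  let danger : List (Int × Int) := knights.foldl (fun d pair =>
    pvKnightMoves.foldl (fun d m =>
      let temp := (pair.1 + m.1, pair.2 + m.2)
      if temp.1 ≥ 0 ∧ temp.1 < n then
        if temp.2 ≥ 0 ∧ temp.2 < n then
          if temp ∉ d then d ++ [temp] else d
        else d
      else d) d) danger0
  board_size - danger.length

-- ===== PORT B =====
def safe_squares_knights_alt (n : Int) (knights : List (Int × Int)) : Int :=
  let moves : List (Int × Int) :=
    [(2, 1), (1, 2), (2, -1), (-1, 2), (-2, 1), (1, -2), (-2, -1), (-1, -2)]
  -- cands = sorted((x+dx, y+dy) for x, y in knights for dx, dy in moves if in board)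
  let cands : List (Int × Int) := PySem.List.sorted2
    (knights.flatMap (fun p => moves.filterMap (fun m =>
      if 0 ≤ p.1 + m.1 ∧ p.1 + m.1 < n ∧ 0 ≤ p.2 + m.2 ∧ p.2 + m.2 < n
      then some (p.1 + m.1, p.2 + m.2) else none)))
    (fun c => c.1) (fun c => c.2)
  -- extra = 0; prev = None; for c in cands: if c != prev and c not in knights: extra += 1; prev = c
  let r : Option (Int × Int) × Int := cands.foldl
    (fun st c => (some c, if some c ≠ st.1 ∧ c ∉ knights then st.2 + 1 else st.2))
    (none, 0)
  n * n - knights.length - r.2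

-- ===== PRECONDITION & SPEC =====
def Spec_safe_squares_knights (n : Int) (knights : List (Int × Int)) (out : Int) : Prop := out = safe_squares_knights_alt n knights
instance (n : Int) (knights : List (Int × Int)) (out : Int) : Decidable (Spec_safe_squares_knights n knights out) := by unfold Spec_safe_squares_knights; infer_instance

-- ===== CLAIM (what is proved, stated in full; the proofs are below) =====
def Claim_equal_safe_squares_knights : Prop := ∀ (n : Int) (knights : List (Int × Int)), Dom_safe_squares_knights n knights → Spec_safe_squares_knights n knights (safe_squares_knights n knights)

-- ===== LEMMAS AND PROOFS =====

-- ---- the candidate list (ghost value shared by both analyses) ----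
def pvCands (n : Int) (knights : List (Int × Int)) : List (Int × Int) :=
  knights.flatMap (fun p => pvKnightMoves.filterMap (fun m =>
    if 0 ≤ p.1 + m.1 ∧ p.1 + m.1 < n ∧ 0 ≤ p.2 + m.2 ∧ p.2 + m.2 < n
    then some (p.1 + m.1, p.2 + m.2) else none))

-- number of distinct elements of l that are not knight positions
def pvND (knights l : List (Int × Int)) : Nat :=
  (l.toFinset.filter (fun c => c ∉ knights)).card

theorem pvND_perm (knights : List (Int × Int)) {l l' : List (Int × Int)} (h : l.Perm l') :
    pvND knights l = pvND knights l' := by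
  unfold pvND
  have ht : l.toFinset = l'.toFinset := by
    ext x; simp [List.mem_toFinset, h.mem_iff]
  rw [ht]

theorem pvND_cons (knights : List (Int × Int)) (c : Int × Int) (rest : List (Int × Int)) :
    pvND knights (c :: rest) =
      (if c ∉ knights then 1 else 0) + pvND knights (rest.filter (fun x => x ≠ c)) := by
  unfold pvND
  rw [List.toFinset_filter, List.toFinset_cons]
  have herase : ({x ∈ rest.toFinset | (fun x => decide (x ≠ c)) x = true} : Finset (Int × Int))
      = rest.toFinset.erase c := by
    simpa using Finset.filter_ne' rest.toFinset c
  rw [herase, Finset.filter_insert, Finset.filter_erase]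
  by_cases hc : c ∉ knights
  · rw [if_pos hc, if_pos hc]
    by_cases hm : c ∈ ({x ∈ rest.toFinset | x ∉ knights} : Finset (Int × Int))
    · rw [Finset.insert_eq_self.mpr hm, ← Finset.card_erase_add_one hm]
      omega
    · rw [Finset.card_insert_of_notMem hm, Finset.erase_eq_of_notMem hm]
      omega
  · rw [if_neg hc, if_neg hc,
      Finset.erase_eq_of_notMem (show c ∉ ({x ∈ rest.toFinset | x ∉ knights} : Finset (Int × Int))
        from fun hmem => hc (Finset.mem_filter.mp hmem).2)]
    omega

-- ---- A-side: the danger list is knights ++ (distinct candidates not in knights) ----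
-- the invariant tying A's danger list to the candidate set:
-- danger = knights ++ (squares of the set not in knights, in insertion order)
def pvInv (knights : List (Int × Int)) (s d : List (Int × Int)) : Prop :=
  d = knights ++ s.filter (fun x => decide (x ∉ knights))

-- one in-board square preserves the invariant
theorem pv_step (knights : List (Int × Int)) (s d : List (Int × Int)) (t : Int × Int)
    (h : pvInv knights s d) :
    pvInv knights (PySem.Set.add s t) (if t ∉ d then d ++ [t] else d) := by
  unfold pvInv at h ⊢
  by_cases hk : t ∈ knights
  · have hd : t ∈ d := by rw [h]; exact List.mem_append_left _ hk
    rw [if_neg (by simpa using hd)]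
    rw [PySem.Set.add_eq_ite]
    split_ifs with hs
    · exact h
    · rw [List.filter_append, h]
      simp [hk]
  · by_cases hs : t ∈ s
    · have hd : t ∈ d := by
        rw [h]
        exact List.mem_append_right _ (List.mem_filter.mpr ⟨hs, by simpa using hk⟩)
      rw [if_neg (by simpa using hd), PySem.Set.add_of_mem hs]
      exact h
    · have hd : t ∉ d := by
        rw [h]
        intro hmem
        rcases List.mem_append.mp hmem with h1 | h1
        · exact hk h1
        · exact hs (List.mem_filter.mp h1).1
      rw [if_pos hd, PySem.Set.add_of_not_mem hs, List.filter_append, h]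
      simp [hk, List.append_assoc]

-- the inner move loop of A mirrors Set.add over the inner candidates
theorem pv_inner (n : Int) (knights : List (Int × Int)) (p : Int × Int)
    (moves : List (Int × Int)) (s d : List (Int × Int)) (h : pvInv knights s d) :
    pvInv knights
      ((moves.filterMap (fun m =>
        if 0 ≤ p.1 + m.1 ∧ p.1 + m.1 < n ∧ 0 ≤ p.2 + m.2 ∧ p.2 + m.2 < n
        then some (p.1 + m.1, p.2 + m.2) else none)).foldl PySem.Set.add s)
      (moves.foldl (fun d m =>
        let temp := (p.1 + m.1, p.2 + m.2)
        if temp.1 ≥ 0 ∧ temp.1 < n then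
          if temp.2 ≥ 0 ∧ temp.2 < n then
            if temp ∉ d then d ++ [temp] else d
          else d
        else d) d) := by
  induction moves generalizing s d with
  | nil => exact h
  | cons m ms ih =>
    simp only [List.foldl, List.filterMap_cons]
    set t := (p.1 + m.1, p.2 + m.2) with ht
    by_cases h1 : 0 ≤ t.1 ∧ t.1 < n
    · by_cases h2 : 0 ≤ t.2 ∧ t.2 < n
      · rw [if_pos ⟨h1.1, h1.2, h2.1, h2.2⟩, if_pos ⟨h1.1, h1.2⟩, if_pos ⟨h2.1, h2.2⟩]
        exact ih _ _ (pv_step knights s d t h)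
      · rw [if_neg (by tauto), if_pos ⟨h1.1, h1.2⟩, if_neg (by tauto)]
        exact ih _ _ h
    · rw [if_neg (by tauto), if_neg (by tauto)]
      exact ih _ _ h

-- the outer knight loop preserves the invariant, with the set realised as Set.add over pvCands
theorem pv_outer (n : Int) (knights l : List (Int × Int)) (s d : List (Int × Int))
    (h : pvInv knights s d) :
    pvInv knights
      ((l.flatMap (fun p => pvKnightMoves.filterMap (fun m =>
        if 0 ≤ p.1 + m.1 ∧ p.1 + m.1 < n ∧ 0 ≤ p.2 + m.2 ∧ p.2 + m.2 < n
        then some (p.1 + m.1, p.2 + m.2) else none))).foldl PySem.Set.add s)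
      (l.foldl (fun d pair =>
        pvKnightMoves.foldl (fun d m =>
          let temp := (pair.1 + m.1, pair.2 + m.2)
          if temp.1 ≥ 0 ∧ temp.1 < n then
            if temp.2 ≥ 0 ∧ temp.2 < n then
              if temp ∉ d then d ++ [temp] else d
            else d
          else d) d) d) := by
  induction l generalizing s d with
  | nil => exact h
  | cons p ps ih =>
    simp only [List.foldl, List.flatMap_cons, List.foldl_append]
    exact ih _ _ (pv_inner n knights p pvKnightMoves s d h)

-- the filtered distinct-candidate list has length pvND (pvCands n knights)
theorem pv_filter_len (n : Int) (knights : List (Int × Int)) :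
    (((pvCands n knights).foldl PySem.Set.add []).filter
        (fun x => decide (x ∉ knights))).length = pvND knights (pvCands n knights) := by
  have hfold : (pvCands n knights).foldl PySem.Set.add [] = PySem.Set.ofList (pvCands n knights) :=
    (PySem.Set.ofList_eq_foldl _).symm
  rw [hfold]
  have hnd : (PySem.Set.ofList (pvCands n knights)).Nodup := PySem.Set.nodup_ofList _
  rw [← List.toFinset_card_of_nodup (hnd.filter _), List.toFinset_filter]
  unfold pvND
  congr 1
  ext x
  simp [PySem.Set.mem_ofList]

-- ---- B-side: the lex order used by Python's tuple sort ----
def pvLe (a b : Int × Int) : Prop := a.1 < b.1 ∨ (a.1 = b.1 ∧ a.2 ≤ b.2)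

def pvBf (a b : Int × Int) : Bool :=
  decide (a.1 < b.1) || (!decide (b.1 < a.1) && decide (a.2 < b.2))

theorem pvLe_total (a b : Int × Int) : pvLe a b ∨ pvLe b a := by
  unfold pvLe; omega

theorem pvLe_antisymm {a b : Int × Int} (h1 : pvLe a b) (h2 : pvLe b a) : a = b := by
  unfold pvLe at h1 h2
  have : a.1 = b.1 ∧ a.2 = b.2 := by omega
  exact Prod.ext this.1 this.2

theorem pvBf_iff (a b : Int × Int) : pvBf a b = true ↔ ¬ pvLe b a := by
  unfold pvBf pvLe
  simp only [Bool.or_eq_true, Bool.and_eq_true, Bool.not_eq_eq_eq_not, Bool.not_true,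
    decide_eq_true_eq, decide_eq_false_iff_not]
  omega

theorem pv_insertBy_cons (x y : Int × Int) (ys : List (Int × Int)) :
    PySem.List.insertBy pvBf x (y :: ys) =
      if pvBf x y then x :: y :: ys else y :: PySem.List.insertBy pvBf x ys := by
  simp [PySem.List.insertBy]

theorem pv_insertBy_pairwise (x : Int × Int) (ys : List (Int × Int))
    (h : ys.Pairwise pvLe) : (PySem.List.insertBy pvBf x ys).Pairwise pvLe := by
  induction ys with
  | nil => simp [PySem.List.insertBy]
  | cons y ys ih =>
    rw [pv_insertBy_cons]
    rcases List.pairwise_cons.mp h with ⟨hy, hys⟩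
    by_cases hb : pvBf x y
    · rw [if_pos hb]
      have hxy : pvLe x y := by
        rcases pvLe_total x y with h' | h'
        · exact h'
        · exact absurd h' (pvBf_iff x y |>.mp hb)
      refine List.pairwise_cons.mpr ⟨?_, h⟩
      intro z hz
      rcases List.mem_cons.mp hz with rfl | hz'
      · exact hxy
      · rcases hxy with h1 | h1 <;> rcases hy z hz' with h2 | h2 <;> unfold pvLe at * <;> omega
    · rw [if_neg hb]
      have hyx : pvLe y x := by
        by_contra hc
        exact hb ((pvBf_iff x y).mpr hc)
      refine List.pairwise_cons.mpr ⟨?_, ih hys⟩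
      intro z hz
      rcases (PySem.List.mem_insertBy pvBf x z ys).mp hz with rfl | hz'
      · exact hyx
      · exact hy z hz'

theorem pv_sorted2_pairwise (xs : List (Int × Int)) :
    (PySem.List.sorted2 xs (fun c => c.1) (fun c => c.2) false).Pairwise pvLe := by
  show (xs.foldl (fun acc x => PySem.List.insertBy _ x acc) []).Pairwise pvLe
  have key : ∀ (l acc : List (Int × Int)), acc.Pairwise pvLe →
      (l.foldl (fun acc x => PySem.List.insertBy pvBf x acc) acc).Pairwise pvLe := by
    intro l
    induction l with
    | nil => intro acc h; exact h
    | cons x xs ih =>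
      intro acc h
      exact ih _ (pv_insertBy_pairwise x acc h)
  exact key xs [] List.Pairwise.nil

-- ---- B-side: the prev-skipping scan counts distinct non-knight squares of a sorted list ----
theorem pv_scan (knights : List (Int × Int)) :
    ∀ (l : List (Int × Int)), l.Pairwise pvLe →
    ∀ (po : Option (Int × Int)) (acc : Int),
      (∀ p, po = some p → ∀ c ∈ l, pvLe p c) →
      (l.foldl (fun st c => (some c, if some c ≠ st.1 ∧ c ∉ knights then st.2 + 1 else st.2))
        (po, acc)).2 =
        acc + (pvND knights (po.elim l (fun p => l.filter (fun x => x ≠ p))) : Int) := by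
  intro l
  induction l with
  | nil =>
    intro _ po acc _
    cases po <;> simp [pvND]
  | cons c rest ih =>
    intro hpw po acc hlo
    rcases List.pairwise_cons.mp hpw with ⟨hc, hrest⟩
    have hstep := ih hrest (some c) (acc + if some c ≠ po ∧ c ∉ knights then 1 else 0)
      (by intro p hp x hx; cases hp; exact hc x hx)
    simp only [List.foldl] at hstep ⊢
    have hif : (if some c ≠ po ∧ c ∉ knights then acc + 1 else acc)
        = acc + if some c ≠ po ∧ c ∉ knights then 1 else 0 := by
      split_ifs <;> omega
    rw [hif, hstep]
    cases po with
    | none =>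
      simp only [Option.elim_none, Option.elim_some]
      rw [pvND_cons]
      by_cases hk : c ∉ knights
      · rw [if_pos ⟨by simp, hk⟩, if_pos hk]
        push_cast
        ring
      · rw [if_neg (fun h => hk h.2), if_neg hk]
        push_cast
        ring
    | some p =>
      simp only [Option.elim_some]
      by_cases hpc : p = c
      · subst hpc
        rw [if_neg (by simp)]
        have hfilt : (p :: rest).filter (fun x => x ≠ p) = rest.filter (fun x => x ≠ p) := by
          simp
        rw [hfilt]
        omega
      · have hrp : rest.filter (fun x => x ≠ p) = rest := by
          apply List.filter_eq_self.mpr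
          intro r hr
          simp only [ne_eq, decide_eq_true_eq]
          intro hrpe
          subst hrpe
          exact hpc (pvLe_antisymm (hlo r rfl c (by simp)) (hc r hr))
        have hfc : (c :: rest).filter (fun x => x ≠ p) = c :: rest.filter (fun x => x ≠ p) := by
          simp [Ne.symm hpc]
        rw [hfc, hrp, pvND_cons]
        by_cases hk : c ∉ knights
        · rw [if_pos ⟨by simp [Ne.symm hpc], hk⟩, if_pos hk]
          push_cast
          ring
        · rw [if_neg (fun h => hk h.2), if_neg hk]
          push_cast
          ring

-- ===== VERDICT (by name: the statement is the Claim_ definition above) =====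
theorem safe_squares_knights_spec : Claim_equal_safe_squares_knights := by
  intro n knights _
  unfold Spec_safe_squares_knights safe_squares_knights safe_squares_knights_alt
  simp only [PySem.List.foldl_append_singleton_eq_self, List.nil_append]
  -- A's danger list
  have h0 : pvInv knights ([] : List (Int × Int)) knights := by simp [pvInv]
  have hA := pv_outer n knights knights [] knights h0
  unfold pvInv at hA
  rw [show ([(2, 1), (1, 2), (2, -1), (-1, 2), (-2, 1), (1, -2), (-2, -1), (-1, -2)] :
      List (Int × Int)) = pvKnightMoves from rfl]
  rw [show (knights.flatMap (fun p => pvKnightMoves.filterMap (fun m =>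
      if 0 ≤ p.1 + m.1 ∧ p.1 + m.1 < n ∧ 0 ≤ p.2 + m.2 ∧ p.2 + m.2 < n
      then some (p.1 + m.1, p.2 + m.2) else none))) = pvCands n knights from rfl] at hA ⊢
  rw [hA, List.length_append]
  have hflen := pv_filter_len n knights
  rw [hflen]
  -- B's scan
  have hsorted := pv_sorted2_pairwise (pvCands n knights)
  have hscan := pv_scan knights _ hsorted none 0 (by intro p hp; cases hp)
  simp only [Option.elim_none] at hscan
  rw [hscan]
  have hperm : (PySem.List.sorted2 (pvCands n knights) (fun c => c.1) (fun c => c.2) false).Perm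
      (pvCands n knights) := PySem.List.sorted2_perm _ _ _ _
  rw [pvND_perm knights hperm]
  push_cast
  ring
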